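-- pv_equiv track=rewrite | github.com/marakomer/whatsapp_group_intersection_script_selenium | whatsapp_group_analyzer.py | parse_selection
-- ===== SOURCE A (Python) =====
-- def parse_selection(selection, max_num):
--     """Parse user selection string (e.g., '1,3,5' or '1-3,5')"""
--     indices = set()
--     parts = selection.split(',')
--
--     for part in parts:
--         part = part.strip()
--         if '-' in part:
--             start, end = part.split('-')
--             start, end = int(start.strip()), int(end.strip())
--             indices.update(range(start-1, end))
--         else:
--             indices.add(int(part.strip()) - 1)
--
--     # Filter valid indices
--     valid_indices = [i for i in indices if 0 <= i < max_num]
--     return sorted(valid_indices)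
-- ===== SOURCE B (Python) =====
-- def parse_selection(selection, max_num):
--     """Parse user selection string (e.g., '1,3,5' or '1-3,5')"""
--     seen = [False] * max_num  # negative/zero max_num -> []
--     n = len(seen)
--
--     for part in selection.split(','):
--         part = part.strip()
--         if '-' in part:
--             start, end = part.split('-')
--             start, end = int(start.strip()), int(end.strip())
--             lo = max(start - 1, 0)
--             hi = min(end, n)
--             for i in range(lo, hi):
--                 seen[i] = True
--         else:
--             i = int(part.strip()) - 1
--             if 0 <= i < n:
--                 seen[i] = True
--
--     return [i for i in range(n) if seen[i]]
-- ===== Notes on version B (the rewrite author's own statement) =====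
-- stated objective: alternative
-- what changed: B replaces A's set accumulation plus final filter-and-sort with a boolean marking array over [0, max_num): each parsed index or clamped range marks slots, and the result is read off by one in-order scan, so there is no sort and ranges are clamped before iteration instead of materialised into a set.
import Mathlib
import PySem

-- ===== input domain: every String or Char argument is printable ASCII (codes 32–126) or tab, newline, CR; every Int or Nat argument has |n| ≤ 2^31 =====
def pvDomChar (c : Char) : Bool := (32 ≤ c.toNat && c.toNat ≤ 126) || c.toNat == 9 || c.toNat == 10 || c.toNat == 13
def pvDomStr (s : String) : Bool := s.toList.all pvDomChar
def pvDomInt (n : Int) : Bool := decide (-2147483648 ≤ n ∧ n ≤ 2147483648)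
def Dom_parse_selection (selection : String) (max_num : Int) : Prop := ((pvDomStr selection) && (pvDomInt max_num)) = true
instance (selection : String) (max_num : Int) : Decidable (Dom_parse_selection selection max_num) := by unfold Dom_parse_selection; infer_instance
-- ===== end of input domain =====

-- B replaces A's set-accumulate-filter-sort with a boolean marking array over [0, max_num)
-- scanned in order, so no sort and no unclamped range materialisation; same parsing, same exceptions.

-- ===== PORT A =====
-- loop body of A: fold one comma-part into the set of selected indices
def pvStepA (acc : PySem.Set Int) (part : String) : PySem.Set Int :=
  if PySem.Str.isIn "-" (PySem.Str.strip part) then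
    match PySem.Str.split? (PySem.Str.strip part) "-" with
    | some [s, e] =>
      match PySem.Int.ofStr? (PySem.Str.strip s), PySem.Int.ofStr? (PySem.Str.strip e) with
      | some st, some en => PySem.Set.update acc (PySem.List.pyRange (st - 1) en)
      | _, _ => acc      -- int() ValueError: outside Pre_
    | _ => acc           -- unpacking ValueError: outside Pre_
  else
    match PySem.Int.ofStr? (PySem.Str.strip (PySem.Str.strip part)) with
    | some v => PySem.Set.add acc (v - 1)
    | none => acc        -- int() ValueError: outside Pre_

def parse_selection (selection : String) (max_num : Int) : List Int :=
  let parts := (PySem.Str.split? selection ",").getD []   -- ',' ≠ '' so split? is always `some`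
  let indices := parts.foldl pvStepA PySem.Set.empty
  let valid_indices := indices.filter (fun i => decide (0 ≤ i) && decide (i < max_num))
  PySem.List.sorted valid_indices (fun i => i)

-- ===== PORT B =====
-- loop body of B: mark each selected in-range index in the boolean array (n = len(seen));
-- the guards make every `seen[i] = True` in-bounds, so setIfInBounds is exact
def pvStepB (n : Int) (sn : Array Bool) (part : String) : Array Bool :=
  if PySem.Str.isIn "-" (PySem.Str.strip part) then
    match PySem.Str.split? (PySem.Str.strip part) "-" with
    | some [s, e] =>
      match PySem.Int.ofStr? (PySem.Str.strip s), PySem.Int.ofStr? (PySem.Str.strip e) with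
      | some st, some en =>
        (PySem.List.pyRange (max (st - 1) 0) (min en n)).foldl (fun sn i => sn.setIfInBounds i.toNat true) sn
      | _, _ => sn
    | _ => sn
  else
    match PySem.Int.ofStr? (PySem.Str.strip (PySem.Str.strip part)) with
    | some v =>
      if 0 ≤ v - 1 ∧ v - 1 < n then sn.setIfInBounds (v - 1).toNat true else sn
    | none => sn

def parse_selection_alt (selection : String) (max_num : Int) : List Int :=
  let seen0 : Array Bool := Array.replicate max_num.toNat false
  let n : Int := seen0.size
  let seen := ((PySem.Str.split? selection ",").getD []).foldl (pvStepB n) seen0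
  (PySem.List.pyRange 0 n).filter (fun i => seen.getD i.toNat false)

-- ===== PRECONDITION & SPEC =====
-- a comma-part is accepted by A without a ValueError
def pvPartOK (part : String) : Bool :=
  let p := PySem.Str.strip part
  if PySem.Str.isIn "-" p then
    match PySem.Str.split? p "-" with
    | some [s, e] => (PySem.Int.ofStr? (PySem.Str.strip s)).isSome && (PySem.Int.ofStr? (PySem.Str.strip e)).isSome
    | _ => false
  else (PySem.Int.ofStr? (PySem.Str.strip p)).isSome

-- Pre_ excludes exactly the inputs where Python A raises ValueError (a part that is not an
-- int, or a '-' part that does not split into exactly two ints); B raises there as well.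
def Pre_parse_selection (selection : String) (max_num : Int) : Prop :=
  ∀ part ∈ (PySem.Str.split? selection ",").getD [], pvPartOK part = true
instance (selection : String) (max_num : Int) : Decidable (Pre_parse_selection selection max_num) := by
  unfold Pre_parse_selection; infer_instance

def pvWitness_parse_selection : String × Int := ("1-3, 5, 2", 10)

def Spec_parse_selection (selection : String) (max_num : Int) (out : List Int) : Prop := out = parse_selection_alt selection max_num
instance (selection : String) (max_num : Int) (out : List Int) : Decidable (Spec_parse_selection selection max_num out) := by unfold Spec_parse_selection; infer_instance

-- ===== CLAIM (what is proved, stated in full; the proofs are below) =====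
def Claim_equal_parse_selection : Prop := ∀ (selection : String) (max_num : Int), Dom_parse_selection selection max_num → Pre_parse_selection selection max_num → Spec_parse_selection selection max_num (parse_selection selection max_num)

-- ===== LEMMAS AND PROOFS =====

lemma pv_mark_size (L : List Int) : ∀ (sn : Array Bool),
    (L.foldl (fun sn i => sn.setIfInBounds i.toNat true) sn).size = sn.size := by
  induction L with
  | nil => intro sn; rfl
  | cons i L ih =>
    intro sn
    simpa [List.foldl_cons] using (ih (sn.setIfInBounds i.toNat true)).trans (by simp)

lemma pv_mark_getD (L : List Int) : ∀ (sn : Array Bool) (k : Nat), k < sn.size →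
    (∀ i ∈ L, 0 ≤ i ∧ i < (sn.size : Int)) →
    ((L.foldl (fun sn i => sn.setIfInBounds i.toNat true) sn).getD k false = true ↔
      sn.getD k false = true ∨ (k : Int) ∈ L) := by
  induction L with
  | nil => intro sn k hk _; simp
  | cons i L ih =>
    intro sn k hk hL
    obtain ⟨hi0, hin⟩ := hL i (by simp)
    have hsz : (sn.setIfInBounds i.toNat true).size = sn.size := by simp
    have := ih (sn.setIfInBounds i.toNat true) k (by omega) (by
      intro j hj; have := hL j (by simp [hj]); simpa [hsz] using this)
    simp only [List.foldl_cons] at *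
    rw [this]
    have hset : (sn.setIfInBounds i.toNat true).getD k false = true ↔
        (sn.getD k false = true ∨ (k : Int) = i) := by
      rcases eq_or_ne i.toNat k with h | h
      · have : (k : Int) = i := by omega
        simp [Array.getD_eq_getD_getElem?, h, hk, this]
      · have : ¬ ((k : Int) = i) := by omega
        simp [Array.getD_eq_getD_getElem?, h, this]
    rw [hset]
    constructor
    · rintro ((h | h) | h) <;> simp_all
    · rintro (h | h)
      · exact Or.inl (Or.inl h)
      · simp only [List.mem_cons] at h
        rcases h with h | h
        · exact Or.inl (Or.inr h)
        · exact Or.inr h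

lemma pv_step_inv (n : Int) (part : String) (acc : PySem.Set Int) (sn : Array Bool)
    (hnd : acc.Nodup) (hlen : (sn.size : Int) = n)
    (hinv : ∀ k : Nat, (k : Int) < n → (sn.getD k false = true ↔ (k : Int) ∈ acc)) :
    (pvStepA acc part).Nodup ∧ ((pvStepB n sn part).size : Int) = n ∧
    (∀ k : Nat, (k : Int) < n → ((pvStepB n sn part).getD k false = true ↔ (k : Int) ∈ pvStepA acc part)) := by
  unfold pvStepA pvStepB
  cases hIn : PySem.Str.isIn "-" (PySem.Str.strip part)
  · simp only [Bool.false_eq_true, if_false]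
    cases hv : PySem.Int.ofStr? (PySem.Str.strip (PySem.Str.strip part)) with
    | none => exact ⟨hnd, hlen, hinv⟩
    | some v =>
      refine ⟨PySem.Set.nodup_add acc (v - 1) hnd, ?_, ?_⟩
      · dsimp only
        by_cases h : 0 ≤ v - 1 ∧ v - 1 < n
        · rw [if_pos h]; simpa using hlen
        · rw [if_neg h]; exact hlen
      · intro k hk
        dsimp only
        rw [PySem.Set.mem_add]
        by_cases h : 0 ≤ v - 1 ∧ v - 1 < n
        · rw [if_pos h, Array.getD_eq_getD_getElem?, Array.getElem?_setIfInBounds]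
          rcases eq_or_ne ((v - 1).toNat) k with ht | ht
          · have he : (k : Int) = v - 1 := by omega
            simp [ht, show k < sn.size by omega, he]
          · have he : ¬ ((k : Int) = v - 1) := by omega
            rw [if_neg ht, ← Array.getD_eq_getD_getElem?, hinv k hk]
            simp [he]
        · rw [if_neg h]
          have he : ¬ ((k : Int) = v - 1) := by omega
          rw [hinv k hk]; simp [he]
  · simp only [if_true]
    cases hsp : PySem.Str.split? (PySem.Str.strip part) "-" with
    | none => exact ⟨hnd, hlen, hinv⟩
    | some l =>
      match l with
      | [] => exact ⟨hnd, hlen, hinv⟩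
      | [s] => exact ⟨hnd, hlen, hinv⟩
      | s :: e :: x :: r => exact ⟨hnd, hlen, hinv⟩
      | [s, e] =>
        dsimp only
        cases hs : PySem.Int.ofStr? (PySem.Str.strip s) with
        | none => exact ⟨hnd, hlen, hinv⟩
        | some st =>
          cases he : PySem.Int.ofStr? (PySem.Str.strip e) with
          | none => exact ⟨hnd, hlen, hinv⟩
          | some en =>
            refine ⟨PySem.Set.nodup_update acc _ hnd, ?_, ?_⟩
            · simp [pv_mark_size, hlen]
            · intro k hk
              rw [PySem.Set.mem_update]
              have hk' : k < sn.size := by omega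
              rw [pv_mark_getD _ sn k hk' (by
                intro j hj
                rw [PySem.List.mem_pyRange_one] at hj
                exact ⟨by omega, by omega⟩)]
              rw [hinv k hk]
              simp only [PySem.List.mem_pyRange_one]
              constructor
              · rintro (h | h)
                · exact Or.inl h
                · exact Or.inr (by omega)
              · rintro (h | h)
                · exact Or.inl h
                · exact Or.inr (by omega)

lemma pv_fold_inv (n : Int) (parts : List String) : ∀ (acc : PySem.Set Int) (sn : Array Bool),
    acc.Nodup → (sn.size : Int) = n →
    (∀ k : Nat, (k : Int) < n → (sn.getD k false = true ↔ (k : Int) ∈ acc)) →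
    (parts.foldl pvStepA acc).Nodup ∧
    ((parts.foldl (pvStepB n) sn).size : Int) = n ∧
    (∀ k : Nat, (k : Int) < n →
      ((parts.foldl (pvStepB n) sn).getD k false = true ↔ (k : Int) ∈ parts.foldl pvStepA acc)) := by
  induction parts with
  | nil => intro acc sn h1 h2 h3; exact ⟨h1, h2, h3⟩
  | cons part parts ih =>
    intro acc sn h1 h2 h3
    obtain ⟨g1, g2, g3⟩ := pv_step_inv n part acc sn h1 h2 h3
    simpa [List.foldl_cons] using ih (pvStepA acc part) (pvStepB n sn part) g1 g2 g3

-- ===== VERDICT (by name: the statement is the Claim_ definition above) =====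
theorem parse_selection_spec : Claim_equal_parse_selection := by
  intro selection max_num _ _
  unfold Spec_parse_selection parse_selection parse_selection_alt
  set parts := (PySem.Str.split? selection ",").getD [] with hparts
  set N : Int := ((Array.replicate max_num.toNat false).size : Int) with hN
  have hNmax : N = max max_num 0 := by rw [hN, Array.size_replicate]; omega
  have e1 : (PySem.Set.empty : PySem.Set Int).Nodup := List.nodup_nil
  have e2 : (((Array.replicate max_num.toNat false).size : Nat) : Int) = N := rfl
  have e3 : ∀ k : Nat, (k : Int) < N →
      ((Array.replicate max_num.toNat false).getD k false = true ↔ (k : Int) ∈ (PySem.Set.empty : PySem.Set Int)) := by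
    intro k hk
    simp only [PySem.Set.empty, Array.getD_eq_getD_getElem?, Array.getElem?_replicate,
      List.not_mem_nil, iff_false]
    split <;> simp
  obtain ⟨hnd, hlen, hmem⟩ := pv_fold_inv N parts PySem.Set.empty (Array.replicate max_num.toNat false) e1 e2 e3
  set accF := parts.foldl pvStepA PySem.Set.empty
  set snF := parts.foldl (pvStepB N) (Array.replicate max_num.toNat false)
  refine PySem.List.sorted_eq_of_perm_of_pairwise_lt _ _ _ ?_ ?_
  · rw [List.perm_ext_iff_of_nodup ((PySem.List.nodup_pyRange_one 0 N).filter _)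
      (List.Nodup.filter _ hnd)]
    intro a
    simp only [List.mem_filter, PySem.List.mem_pyRange_one]
    constructor
    · rintro ⟨⟨ha0, haN⟩, hg⟩
      have hk : a = ((a.toNat : Nat) : Int) := by omega
      have h2 := (hmem a.toNat (by omega)).1 hg
      rw [← hk] at h2
      exact ⟨h2, by simp only [Bool.and_eq_true, decide_eq_true_eq]; omega⟩
    · rintro ⟨hmemA, hcond⟩
      simp only [Bool.and_eq_true, decide_eq_true_eq] at hcond
      obtain ⟨ha0, ham⟩ := hcond
      have haN : a < N := by omega
      have hk : a = ((a.toNat : Nat) : Int) := by omega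
      exact ⟨⟨ha0, haN⟩, (hmem a.toNat (by omega)).2 (by rwa [← hk])⟩
  · exact List.Pairwise.filter _ (PySem.List.pairwise_lt_pyRange_one 0 N)
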